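-- pv_equiv track=rewrite | github.com/Healura/user_management | src/auth/password_policy.py | _has_sequential_chars
-- ===== SOURCE A (Python) =====
-- def _has_sequential_chars(password: str, threshold: int = 4) -> bool:
--     """
--     Check if password has sequential characters.
--
--     Args:
--         password: Password to check
--         threshold: Minimum length of sequence to flag
--
--     Returns:
--         True if has sequential characters
--     """
--     for i in range(len(password) - threshold + 1):
--         sequence = password[i:i + threshold]
--
--         # Check ascending sequence
--         if all(ord(sequence[j]) == ord(sequence[j-1]) + 1 for j in range(1, len(sequence))):
--             return True
--
--         # Check descending sequence
--         if all(ord(sequence[j]) == ord(sequence[j-1]) - 1 for j in range(1, len(sequence))):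
--             return True
--
--     return False
-- ===== SOURCE B (Python) =====
-- def _has_sequential_chars(password: str, threshold: int = 4) -> bool:
--     """Single pass: track the lengths of the current ascending and descending
--     consecutive-ordinal runs, returning as soon as one reaches threshold."""
--     if threshold <= 0:
--         # the empty run (length 0) already meets a non-positive threshold
--         return True
--     asc = desc = 0
--     prev = None
--     for c in password:
--         o = ord(c)
--         asc = asc + 1 if prev is not None and o == prev + 1 else 1
--         desc = desc + 1 if prev is not None and o == prev - 1 else 1
--         if asc >= threshold or desc >= threshold:
--             return True
--         prev = o
--     return False
-- ===== Notes on version B (the rewrite author's own statement) =====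
-- stated objective: faster
-- what changed: Replaced the sliding-window scan (each of the n windows rechecked threshold-1 adjacent pairs) by a single pass that maintains the lengths of the current ascending and descending consecutive runs and exits as soon as one reaches the threshold.
import Mathlib
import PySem

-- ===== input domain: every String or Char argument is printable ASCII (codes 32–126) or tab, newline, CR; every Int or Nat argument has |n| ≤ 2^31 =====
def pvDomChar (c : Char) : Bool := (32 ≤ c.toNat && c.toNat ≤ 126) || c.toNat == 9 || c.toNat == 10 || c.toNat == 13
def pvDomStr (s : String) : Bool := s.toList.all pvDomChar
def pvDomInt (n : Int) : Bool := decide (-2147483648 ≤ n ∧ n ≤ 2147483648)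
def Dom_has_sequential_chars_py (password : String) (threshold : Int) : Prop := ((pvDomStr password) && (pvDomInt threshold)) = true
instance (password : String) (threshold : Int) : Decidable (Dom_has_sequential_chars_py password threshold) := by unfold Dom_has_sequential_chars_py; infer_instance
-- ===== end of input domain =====

-- B replaces A's sliding-window re-checks by one pass tracking the current
-- ascending/descending consecutive-run lengths (objective: faster).


-- ===== PORT A =====
-- inner generator `all(ord(sequence[j]) == ord(sequence[j-1]) + 1 for j in range(1, len(sequence)))`;
-- j and j-1 are always in range there, so pyGetD's default is never used (no IndexError)
def pvInnerUp (seq : List Char) : Bool :=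
  (PySem.List.pyRange 1 (seq.length) 1).all (fun j =>
    decide (((PySem.List.pyGetD seq j ' ').toNat : Int) = ((PySem.List.pyGetD seq (j-1) ' ').toNat : Int) + 1))

def pvInnerDown (seq : List Char) : Bool :=
  (PySem.List.pyRange 1 (seq.length) 1).all (fun j =>
    decide (((PySem.List.pyGetD seq j ' ').toNat : Int) = ((PySem.List.pyGetD seq (j-1) ' ').toNat : Int) - 1))

-- `for i in range(len(password) - threshold + 1): … return True … return False`:
-- the loop with its early return, as index recursion
def pvALoop (cs : List Char) (t : Int) (bound : Int) (i : Int) : Bool :=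
  if h : i < bound then
    let seq := PySem.List.slice cs (some i) (some (i + t))
    if pvInnerUp seq || pvInnerDown seq then true
    else pvALoop cs t bound (i + 1)
  else false
termination_by (bound - i).toNat
decreasing_by omega

def has_sequential_chars_py (password : String) (threshold : Int) : Bool :=
  pvALoop password.toList threshold ((password.toList.length : Int) - threshold + 1) 0

-- ===== PORT B =====
-- single pass carrying (prev ordinal, ascending-run length, descending-run length); early exit ↔ `true`
def pvScan (t : Int) : Option Int → Int → Int → List Char → Bool
  | _, _, _, [] => false
  | prev, asc, desc, c :: rest =>
    let o : Int := (c.toNat : Int)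
    let asc' := if prev = some (o - 1) then asc + 1 else 1
    let desc' := if prev = some (o + 1) then desc + 1 else 1
    if t ≤ asc' ∨ t ≤ desc' then true else pvScan t (some o) asc' desc' rest

def has_sequential_chars_py_alt (password : String) (threshold : Int) : Bool :=
  if threshold ≤ 0 then true
  else pvScan threshold none 0 0 password.toList

-- ===== PRECONDITION & SPEC =====
def Spec_has_sequential_chars_py (password : String) (threshold : Int) (out : Bool) : Prop := out = has_sequential_chars_py_alt password threshold
instance (password : String) (threshold : Int) (out : Bool) : Decidable (Spec_has_sequential_chars_py password threshold out) := by unfold Spec_has_sequential_chars_py; infer_instance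

-- ===== CLAIM (what is proved, stated in full; the proofs are below) =====
def Claim_equal_has_sequential_chars_py : Prop := ∀ (password : String) (threshold : Int), Dom_has_sequential_chars_py password threshold → Spec_has_sequential_chars_py password threshold (has_sequential_chars_py password threshold)

-- ===== LEMMAS AND PROOFS =====

-- `w` is a chain of consecutive ascending (resp. descending) ordinals
def consecUp : List Char → Bool
  | [] => true
  | [_] => true
  | a :: b :: r => (decide ((b.toNat : Int) = (a.toNat : Int) + 1)) && consecUp (b :: r)

def consecDown : List Char → Bool
  | [] => true
  | [_] => true
  | a :: b :: r => (decide ((b.toNat : Int) = (a.toNat : Int) - 1)) && consecDown (b :: r)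

-- `w` is an ascending (resp. descending) chain continuing the previous ordinal `q`
def upFromO (q : Option Int) : List Char → Prop
  | [] => True
  | c :: r => q = some ((c.toNat : Int) - 1) ∧ upFromO (some (c.toNat : Int)) r

def downFromO (q : Option Int) : List Char → Prop
  | [] => True
  | c :: r => q = some ((c.toNat : Int) + 1) ∧ downFromO (some (c.toNat : Int)) r

-- "some window of length tn is a consecutive run" — what A computes
def W (cs : List Char) (tn : Nat) : Prop :=
  ∃ u w v, cs = u ++ w ++ v ∧ w.length = tn ∧ (consecUp w = true ∨ consecDown w = true)

-- invariant for B's scan state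
def Pinv (t : Int) (q : Option Int) (a d : Int) (cs : List Char) : Prop :=
  (∃ k : Nat, 1 ≤ k ∧ k ≤ cs.length ∧ upFromO q (cs.take k) ∧ t ≤ a + k) ∨
  (∃ k : Nat, 1 ≤ k ∧ k ≤ cs.length ∧ downFromO q (cs.take k) ∧ t ≤ d + k) ∨
  W cs t.toNat

lemma consecUp_cons_iff (c : Char) (w : List Char) :
    consecUp (c :: w) = true ↔ upFromO (some (c.toNat : Int)) w := by
  induction w generalizing c with
  | nil => simp [consecUp, upFromO]
  | cons b r ih =>
    simp only [consecUp, upFromO, Bool.and_eq_true, decide_eq_true_eq, ih]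
    constructor
    · rintro ⟨h1, h2⟩; exact ⟨by simp; omega, h2⟩
    · rintro ⟨h1, h2⟩; simp at h1; exact ⟨by omega, h2⟩

lemma consecDown_cons_iff (c : Char) (w : List Char) :
    consecDown (c :: w) = true ↔ downFromO (some (c.toNat : Int)) w := by
  induction w generalizing c with
  | nil => simp [consecDown, downFromO]
  | cons b r ih =>
    simp only [consecDown, downFromO, Bool.and_eq_true, decide_eq_true_eq, ih]
    constructor
    · rintro ⟨h1, h2⟩; exact ⟨by simp; omega, h2⟩
    · rintro ⟨h1, h2⟩; simp at h1; exact ⟨by omega, h2⟩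

lemma upFromO_take (q : Option Int) (w : List Char) (k : Nat) (h : upFromO q w) :
    upFromO q (w.take k) := by
  induction w generalizing q k with
  | nil => simpa using h
  | cons c r ih =>
    cases k with
    | zero => simp [upFromO]
    | succ m => exact ⟨h.1, ih _ _ h.2⟩

lemma downFromO_take (q : Option Int) (w : List Char) (k : Nat) (h : downFromO q w) :
    downFromO q (w.take k) := by
  induction w generalizing q k with
  | nil => simpa using h
  | cons c r ih =>
    cases k with
    | zero => simp [downFromO]
    | succ m => exact ⟨h.1, ih _ _ h.2⟩

lemma upFromO_none (w : List Char) (h : upFromO none w) : w = [] := by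
  cases w with
  | nil => rfl
  | cons c r => exact absurd h.1 (by simp)

lemma downFromO_none (w : List Char) (h : downFromO none w) : w = [] := by
  cases w with
  | nil => rfl
  | cons c r => exact absurd h.1 (by simp)

lemma consecUp_iff_idx (w : List Char) :
    consecUp w = true ↔ ∀ j : Nat, (h : j + 1 < w.length) →
      (w[j+1].toNat : Int) = (w[j].toNat : Int) + 1 := by
  induction w with
  | nil => simp [consecUp]
  | cons a r ih =>
    cases r with
    | nil => simp [consecUp]
    | cons b s =>
      simp only [consecUp, Bool.and_eq_true, decide_eq_true_eq, ih]
      constructor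
      · rintro ⟨h1, h2⟩ j hj
        cases j with
        | zero => simpa using h1
        | succ m =>
          have := h2 m (by simpa using hj)
          simpa using this
      · intro h
        refine ⟨by simpa using h 0 (by simp), ?_⟩
        intro j hj
        have := h (j+1) (by simpa using hj)
        simpa using this

lemma consecDown_iff_idx (w : List Char) :
    consecDown w = true ↔ ∀ j : Nat, (h : j + 1 < w.length) →
      (w[j+1].toNat : Int) = (w[j].toNat : Int) - 1 := by
  induction w with
  | nil => simp [consecDown]
  | cons a r ih =>
    cases r with
    | nil => simp [consecDown]
    | cons b s =>
      simp only [consecDown, Bool.and_eq_true, decide_eq_true_eq, ih]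
      constructor
      · rintro ⟨h1, h2⟩ j hj
        cases j with
        | zero => simpa using h1
        | succ m =>
          have := h2 m (by simpa using hj)
          simpa using this
      · intro h
        refine ⟨by simpa using h 0 (by simp), ?_⟩
        intro j hj
        have := h (j+1) (by simpa using hj)
        simpa using this

lemma pvInnerUp_iff (seq : List Char) :
    pvInnerUp seq = true ↔ ∀ j : Nat, (h : j + 1 < seq.length) →
      (seq[j+1].toNat : Int) = (seq[j].toNat : Int) + 1 := by
  unfold pvInnerUp
  rw [List.all_eq_true]
  constructor
  · intro h j hj
    have hm : ((j:Int) + 1) ∈ PySem.List.pyRange 1 (seq.length) 1 := by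
      rw [PySem.List.mem_pyRange_one]
      constructor <;> [omega; exact_mod_cast (by omega : (j:Int) + 1 < seq.length)]
    have := h _ hm
    simp only [decide_eq_true_eq] at this
    rw [show ((j:Int) + 1) = ((j+1 : Nat) : Int) by push_cast; ring] at this
    rw [show ((j+1:Nat):Int) - 1 = ((j:Nat):Int) by push_cast; ring] at this
    rw [PySem.List.pyGetD_natCast, PySem.List.pyGetD_natCast] at this
    rw [List.getD_eq_getElem _ _ hj, List.getD_eq_getElem _ _ (by omega)] at this
    exact this
  · intro h j hm
    rw [PySem.List.mem_pyRange_one] at hm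
    simp only [decide_eq_true_eq]
    obtain ⟨h1, h2⟩ := hm
    set jn : Nat := j.toNat - 1 with hjn
    have hj : j = ((jn + 1 : Nat) : Int) := by omega
    have hlt : jn + 1 < seq.length := by omega
    rw [hj, show ((jn+1:Nat):Int) - 1 = ((jn:Nat):Int) by push_cast; ring,
        PySem.List.pyGetD_natCast, PySem.List.pyGetD_natCast,
        List.getD_eq_getElem _ _ hlt, List.getD_eq_getElem _ _ (by omega)]
    exact h jn hlt

lemma pvInnerDown_iff (seq : List Char) :
    pvInnerDown seq = true ↔ ∀ j : Nat, (h : j + 1 < seq.length) →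
      (seq[j+1].toNat : Int) = (seq[j].toNat : Int) - 1 := by
  unfold pvInnerDown
  rw [List.all_eq_true]
  constructor
  · intro h j hj
    have hm : ((j:Int) + 1) ∈ PySem.List.pyRange 1 (seq.length) 1 := by
      rw [PySem.List.mem_pyRange_one]
      constructor <;> [omega; exact_mod_cast (by omega : (j:Int) + 1 < seq.length)]
    have := h _ hm
    simp only [decide_eq_true_eq] at this
    rw [show ((j:Int) + 1) = ((j+1 : Nat) : Int) by push_cast; ring] at this
    rw [show ((j+1:Nat):Int) - 1 = ((j:Nat):Int) by push_cast; ring] at this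
    rw [PySem.List.pyGetD_natCast, PySem.List.pyGetD_natCast] at this
    rw [List.getD_eq_getElem _ _ hj, List.getD_eq_getElem _ _ (by omega)] at this
    exact this
  · intro h j hm
    rw [PySem.List.mem_pyRange_one] at hm
    simp only [decide_eq_true_eq]
    obtain ⟨h1, h2⟩ := hm
    set jn : Nat := j.toNat - 1 with hjn
    have hj : j = ((jn + 1 : Nat) : Int) := by omega
    have hlt : jn + 1 < seq.length := by omega
    rw [hj, show ((jn+1:Nat):Int) - 1 = ((jn:Nat):Int) by push_cast; ring,
        PySem.List.pyGetD_natCast, PySem.List.pyGetD_natCast,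
        List.getD_eq_getElem _ _ hlt, List.getD_eq_getElem _ _ (by omega)]
    exact h jn hlt

lemma pvInnerUp_eq (seq : List Char) : pvInnerUp seq = consecUp seq := by
  rw [Bool.eq_iff_iff, pvInnerUp_iff, consecUp_iff_idx]

lemma pvInnerDown_eq (seq : List Char) : pvInnerDown seq = consecDown seq := by
  rw [Bool.eq_iff_iff, pvInnerDown_iff, consecDown_iff_idx]

lemma slice_window (cs : List Char) (i t : Int) (h0 : 0 ≤ i) (ht : 1 ≤ t) :
    PySem.List.slice cs (some i) (some (i + t)) = (cs.drop i.toNat).take t.toNat := by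
  rw [show i = ((i.toNat : Nat) : Int) from (Int.toNat_of_nonneg h0).symm,
      show t = ((t.toNat : Nat) : Int) from (Int.toNat_of_nonneg (by omega)).symm]
  exact PySem.List.slice_natCast_add ..

lemma pvALoop_eq_any (cs : List Char) (t b : Int) :
    ∀ (n : Nat) (i : Int), (b - i).toNat ≤ n →
      pvALoop cs t b i = (PySem.List.pyRange i b 1).any (fun j =>
        pvInnerUp (PySem.List.slice cs (some j) (some (j + t))) ||
        pvInnerDown (PySem.List.slice cs (some j) (some (j + t)))) := by
  intro n
  induction n with
  | zero =>
    intro i hn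
    have hb : b ≤ i := by omega
    rw [pvALoop, dif_neg (by omega), PySem.List.pyRange_one_eq_nil hb]
    rfl
  | succ m ih =>
    intro i hn
    by_cases h : i < b
    · rw [pvALoop, dif_pos h, PySem.List.pyRange_one_cons h, List.any_cons]
      by_cases hf : (pvInnerUp (PySem.List.slice cs (some i) (some (i + t))) ||
          pvInnerDown (PySem.List.slice cs (some i) (some (i + t)))) = true
      · rw [if_pos hf, hf, Bool.true_or]
      · rw [if_neg hf, ih (i + 1) (by omega), eq_false_of_ne_true hf, Bool.false_or]
    · rw [pvALoop, dif_neg h, PySem.List.pyRange_one_eq_nil (by omega)]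
      rfl

lemma A_eq_any (password : String) (t : Int) :
    has_sequential_chars_py password t =
      (PySem.List.pyRange 0 ((password.toList.length : Int) - t + 1) 1).any (fun j =>
        pvInnerUp (PySem.List.slice password.toList (some j) (some (j + t))) ||
        pvInnerDown (PySem.List.slice password.toList (some j) (some (j + t)))) := by
  exact pvALoop_eq_any _ _ _ _ 0 (le_refl _)

-- A computes W (for positive threshold)
lemma A_iff_W (password : String) (t : Int) (ht : 1 ≤ t) :
    has_sequential_chars_py password t = true ↔ W password.toList t.toNat := by
  rw [A_eq_any]
  set cs := password.toList with hcs
  rw [List.any_eq_true]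
  constructor
  · rintro ⟨i, hm, hf⟩
    rw [PySem.List.mem_pyRange_one] at hm
    obtain ⟨h0, h1⟩ := hm
    rw [slice_window cs i t h0 ht] at hf
    set seq := (cs.drop i.toNat).take t.toNat with hseq
    have hle : i.toNat + t.toNat ≤ cs.length := by omega
    refine ⟨cs.take i.toNat, seq, cs.drop (i.toNat + t.toNat), ?_, ?_, ?_⟩
    · rw [hseq, List.append_assoc]
      conv_lhs => rw [← List.take_append_drop i.toNat cs]
      congr 1
      rw [← List.drop_drop]
      exact (List.take_append_drop _ _).symm
    · rw [hseq]; simp; omega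
    · simp only [Bool.or_eq_true] at hf
      rw [pvInnerUp_eq, pvInnerDown_eq] at hf
      exact hf
  · rintro ⟨u, w, v, hdec, hlen, hcc⟩
    refine ⟨(u.length : Int), ?_, ?_⟩
    · rw [PySem.List.mem_pyRange_one]
      have : cs.length = u.length + w.length + v.length := by rw [hdec]; simp; omega
      constructor
      · omega
      · have : (u.length : Int) + t ≤ cs.length := by
          rw [show t = ((t.toNat : Nat) : Int) from (Int.toNat_of_nonneg (by omega)).symm]
          omega
        omega
    · rw [slice_window cs _ t (by positivity) ht]
      have h1 : cs.drop ((u.length:Int)).toNat = w ++ v := by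
        simp only [Int.toNat_natCast, hdec, List.append_assoc]
        rw [List.drop_left]
      rw [h1, List.take_left' hlen]
      simp only [Bool.or_eq_true]
      rw [pvInnerUp_eq, pvInnerDown_eq]
      exact hcc

-- B's scan computes the invariant Pinv
lemma scan_iff (t : Int) (ht : 1 ≤ t) (cs : List Char) :
    ∀ (q : Option Int) (a d : Int), 0 ≤ a → 0 ≤ d →
      (pvScan t q a d cs = true ↔ Pinv t q a d cs) := by
  induction cs with
  | nil =>
    intro q a d _ _
    simp only [pvScan]
    constructor
    · intro h; exact absurd h (by simp)
    · rintro (⟨k, hk1, hk2, _, _⟩ | ⟨k, hk1, hk2, _, _⟩ | ⟨u, w, v, hdec, hlen, _⟩)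
      · simp at hk2; omega
      · simp at hk2; omega
      · have := congrArg List.length hdec; simp at this; omega
  | cons c rest ih =>
    intro q a d ha hd
    simp only [pvScan]
    set o : Int := (c.toNat : Int) with ho
    set A' : Int := if q = some (o - 1) then a + 1 else 1 with hA
    set D' : Int := if q = some (o + 1) then d + 1 else 1 with hD
    have hA1 : 1 ≤ A' := by rw [hA]; split_ifs <;> omega
    have hD1 : 1 ≤ D' := by rw [hD]; split_ifs <;> omega
    have htn : ((t.toNat : Nat) : Int) = t := Int.toNat_of_nonneg (by omega)
    -- the step equivalence, used for both branches of the `if`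
    have step : (t ≤ A' ∨ t ≤ D') ∨ Pinv t (some o) A' D' rest ↔ Pinv t q a d (c :: rest) := by
      constructor
      · rintro ((h1 | h2) | hP)
        · by_cases hq : q = some (o - 1)
          · refine Or.inl ⟨1, le_refl 1, by simp, ?_, ?_⟩
            · simp only [List.take_succ_cons, List.take_zero]
              exact ⟨hq, trivial⟩
            · rw [hA, if_pos hq] at h1; push_cast; omega
          · rw [hA, if_neg hq] at h1
            exact Or.inr (Or.inr ⟨[], [c], rest, by simp, by simp; omega, Or.inl rfl⟩)
        · by_cases hq : q = some (o + 1)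
          · refine Or.inr (Or.inl ⟨1, le_refl 1, by simp, ?_, ?_⟩)
            · simp only [List.take_succ_cons, List.take_zero]
              exact ⟨hq, trivial⟩
            · rw [hD, if_pos hq] at h2; push_cast; omega
          · rw [hD, if_neg hq] at h2
            exact Or.inr (Or.inr ⟨[], [c], rest, by simp, by simp; omega, Or.inl rfl⟩)
        · rcases hP with ⟨k, hk1, hk2, hup, hts⟩ | ⟨k, hk1, hk2, hdn, hts⟩ | ⟨u, w, v, hdec, hlen, hcc⟩
          · by_cases hq : q = some (o - 1)
            · refine Or.inl ⟨k + 1, by omega, by simp; omega, ?_, ?_⟩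
              · simp only [List.take_succ_cons]; exact ⟨hq, hup⟩
              · rw [hA, if_pos hq] at hts; push_cast; omega
            · -- a fresh ascending run starts at c, of length 1 + k ≥ t: it contains a window
              rw [hA, if_neg hq] at hts
              have hkt : t.toNat ≤ k + 1 := by omega
              obtain ⟨m, hm⟩ : ∃ m, t.toNat = m + 1 := ⟨t.toNat - 1, by omega⟩
              have hcu : consecUp (c :: rest.take k) = true :=
                (consecUp_cons_iff c _).2 hup
              have hcu2 : consecUp ((c :: rest.take k).take (m + 1)) = true := by
                simp only [List.take_succ_cons]
                exact (consecUp_cons_iff c _).2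
                  (upFromO_take _ _ m ((consecUp_cons_iff c _).1 hcu))
              refine Or.inr (Or.inr ⟨[], (c :: rest).take t.toNat, (c :: rest).drop t.toNat,
                by simp, by rw [List.length_take]; simp; omega, Or.inl ?_⟩)
              have he : (c :: rest).take t.toNat = (c :: rest.take k).take (m + 1) := by
                rw [hm]
                simp only [List.take_succ_cons, List.take_take]
                rw [Nat.min_eq_left (by omega : m ≤ k)]
              rw [he]; exact hcu2
          · by_cases hq : q = some (o + 1)
            · refine Or.inr (Or.inl ⟨k + 1, by omega, by simp; omega, ?_, ?_⟩)
              · simp only [List.take_succ_cons]; exact ⟨hq, hdn⟩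
              · rw [hD, if_pos hq] at hts; push_cast; omega
            · rw [hD, if_neg hq] at hts
              have hkt : t.toNat ≤ k + 1 := by omega
              obtain ⟨m, hm⟩ : ∃ m, t.toNat = m + 1 := ⟨t.toNat - 1, by omega⟩
              have hcu : consecDown (c :: rest.take k) = true :=
                (consecDown_cons_iff c _).2 hdn
              have hcu2 : consecDown ((c :: rest.take k).take (m + 1)) = true := by
                simp only [List.take_succ_cons]
                exact (consecDown_cons_iff c _).2
                  (downFromO_take _ _ m ((consecDown_cons_iff c _).1 hcu))
              refine Or.inr (Or.inr ⟨[], (c :: rest).take t.toNat, (c :: rest).drop t.toNat,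
                by simp, by rw [List.length_take]; simp; omega, Or.inr ?_⟩)
              have he : (c :: rest).take t.toNat = (c :: rest.take k).take (m + 1) := by
                rw [hm]
                simp only [List.take_succ_cons, List.take_take]
                rw [Nat.min_eq_left (by omega : m ≤ k)]
              rw [he]; exact hcu2
          · exact Or.inr (Or.inr ⟨c :: u, w, v, by rw [hdec]; simp, hlen, hcc⟩)
      · rintro (⟨k, hk1, hk2, hup, hts⟩ | ⟨k, hk1, hk2, hdn, hts⟩ | ⟨u, w, v, hdec, hlen, hcc⟩)
        · obtain ⟨m, hm⟩ : ∃ m, k = m + 1 := ⟨k - 1, by omega⟩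
          subst hm
          rw [List.take_succ_cons] at hup
          obtain ⟨hq, hup'⟩ := hup
          have hA' : A' = a + 1 := by rw [hA, if_pos hq]
          rcases Nat.eq_zero_or_pos m with hm0 | hm1
          · subst hm0
            exact Or.inl (Or.inl (by rw [hA']; push_cast at hts; omega))
          · refine Or.inr (Or.inl ⟨m, hm1, by simp at hk2; omega, hup', ?_⟩)
            rw [hA']; push_cast at hts; omega
        · obtain ⟨m, hm⟩ : ∃ m, k = m + 1 := ⟨k - 1, by omega⟩
          subst hm
          rw [List.take_succ_cons] at hdn
          obtain ⟨hq, hdn'⟩ := hdn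
          have hD' : D' = d + 1 := by rw [hD, if_pos hq]
          rcases Nat.eq_zero_or_pos m with hm0 | hm1
          · subst hm0
            exact Or.inl (Or.inr (by rw [hD']; push_cast at hts; omega))
          · refine Or.inr (Or.inr (Or.inl ⟨m, hm1, by simp at hk2; omega, hdn', ?_⟩))
            rw [hD']; push_cast at hts; omega
        · cases u with
          | cons c' u' =>
            simp only [List.cons_append, List.cons.injEq] at hdec
            exact Or.inr (Or.inr (Or.inr ⟨u', w, v, hdec.2, hlen, hcc⟩))
          | nil =>
            simp only [List.nil_append] at hdec
            have htn1 : 1 ≤ t.toNat := by omega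
            cases w with
            | nil => simp at hlen; omega
            | cons cw w' =>
              simp only [List.cons_append, List.cons.injEq] at hdec
              obtain ⟨hc, hrest⟩ := hdec
              subst hc
              rcases Nat.lt_or_ge 1 t.toNat with h2 | h1
              · have hlenw' : w'.length = t.toNat - 1 := by simp at hlen; omega
                rcases hcc with hcu | hcd
                · have hup' : upFromO (some o) w' := (consecUp_cons_iff c w').1 hcu
                  refine Or.inr (Or.inl ⟨t.toNat - 1, by omega, ?_, ?_, ?_⟩)
                  · rw [hrest]; simp; omega
                  · rw [hrest, ← hlenw', List.take_left]
                    exact hup'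
                  · omega
                · have hdn' : downFromO (some o) w' := (consecDown_cons_iff c w').1 hcd
                  refine Or.inr (Or.inr (Or.inl ⟨t.toNat - 1, by omega, ?_, ?_, ?_⟩))
                  · rw [hrest]; simp; omega
                  · rw [hrest, ← hlenw', List.take_left]
                    exact hdn'
                  · omega
              · -- t.toNat = 1, so t = 1 ≤ A'
                exact Or.inl (Or.inl (by omega))
    split_ifs with hcond
    · exact iff_of_true rfl (step.1 (Or.inl hcond))
    · rw [ih (some o) A' D' (by omega) (by omega)]
      constructor
      · intro h; exact step.1 (Or.inr h)
      · intro h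
        rcases step.2 h with hc | hP
        · exact absurd hc hcond
        · exact hP

lemma alt_iff_W (password : String) (t : Int) (ht : 1 ≤ t) :
    has_sequential_chars_py_alt password t = true ↔ W password.toList t.toNat := by
  unfold has_sequential_chars_py_alt
  rw [if_neg (by omega)]
  rw [scan_iff t ht password.toList none 0 0 (le_refl 0) (le_refl 0)]
  constructor
  · rintro (⟨k, hk1, hk2, hup, _⟩ | ⟨k, hk1, hk2, hdn, _⟩ | hW)
    · have := congrArg List.length (upFromO_none _ hup)
      simp only [List.length_take, List.length_nil] at this; omega
    · have := congrArg List.length (downFromO_none _ hdn)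
      simp only [List.length_take, List.length_nil] at this; omega
    · exact hW
  · exact fun h => Or.inr (Or.inr h)

-- for threshold ≤ 0 the window password[n:n+threshold] is empty, so A returns True
lemma A_true_of_nonpos (password : String) (t : Int) (ht : t ≤ 0) :
    has_sequential_chars_py password t = true := by
  rw [A_eq_any, List.any_eq_true]
  set cs := password.toList with hcs
  refine ⟨(cs.length : Int), ?_, ?_⟩
  · rw [PySem.List.mem_pyRange_one]; omega
  · show (pvInnerUp (PySem.List.slice cs (some (cs.length:Int)) (some ((cs.length:Int) + t))) ||
      pvInnerDown (PySem.List.slice cs (some (cs.length:Int)) (some ((cs.length:Int) + t)))) = true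
    have hnil : PySem.List.slice cs (some (cs.length:Int)) (some ((cs.length:Int) + t)) = [] := by
      apply List.eq_nil_of_length_eq_zero
      rw [PySem.List.length_slice]
      have h2 : PySem.List.clampIdx cs.length ((cs.length : Nat) : Int) = cs.length := by
        rw [PySem.List.clampIdx_natCast]; omega
      have h3 : PySem.List.clampIdx cs.length ((cs.length:Int) + t) ≤ cs.length :=
        PySem.List.clampIdx_le ..
      omega
    rw [hnil]
    decide

-- ===== VERDICT (by name: the statement is the Claim_ definition above) =====
theorem has_sequential_chars_py_spec : Claim_equal_has_sequential_chars_py := by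
  intro password threshold _dom
  unfold Spec_has_sequential_chars_py
  by_cases ht : threshold ≤ 0
  · rw [A_true_of_nonpos password threshold ht]
    simp [has_sequential_chars_py_alt, ht]
  · rw [Bool.eq_iff_iff, A_iff_W password threshold (by omega), alt_iff_W password threshold (by omega)]
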